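-- pv_equiv track=rewrite | github.com/AttackandDefenceSecurityLab/AD_WebScanner | similar.py | turn_num
-- ===== SOURCE A (Python) =====
-- dim = 75
--
-- def turn_num(url, length):
--     '''
--     转化为特征向量
--     :param url: url
--     :param length: 域名和协议的长度，我们只需要后面的部分，前面的部分每个url都一样，节省计算
--     :return: url的特征向量
--     '''
--     url = url[length:]
--
--     char_index = [i for i in range(len(url)) if url[i] == '/']
--     char_index.insert(0, 0)
--
--     char_weight = []
--     for i in range(len(char_index)):
--         try:
--             char_weight.append(url[char_index[i]:char_index[i + 1]])
--         except:
--             char_weight.append(url[char_index[i]:])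
--
--     num = len(char_weight)
--
--     url_weight = [ord(j)*(num-i)*(num-i) for i in range(len(char_weight)) for j in char_weight[i]]
--
--     for i in range(len(url_weight), dim):
--         url_weight.append(0)
--     return url_weight
-- ===== SOURCE B (Python) =====
-- dim = 75
--
-- def turn_num(url, length):
--     tail = url[length:]
--     num = tail.count('/') + 1
--     out = []
--     seg = 0
--     for c in tail:
--         if c == '/':
--             seg += 1
--         out.append(ord(c) * (num - seg) * (num - seg))
--     out.extend([0] * (dim - len(out)))
--     return out
-- ===== Notes on version B (the rewrite author's own statement) =====
-- stated objective: simpler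
-- what changed: A builds a slash-position index list, a list of segment substrings and a nested weighted comprehension; B makes a single pass over the tail with an integer segment counter, emitting each character's weight directly, then pads with a replicated zero block.
import Mathlib
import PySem

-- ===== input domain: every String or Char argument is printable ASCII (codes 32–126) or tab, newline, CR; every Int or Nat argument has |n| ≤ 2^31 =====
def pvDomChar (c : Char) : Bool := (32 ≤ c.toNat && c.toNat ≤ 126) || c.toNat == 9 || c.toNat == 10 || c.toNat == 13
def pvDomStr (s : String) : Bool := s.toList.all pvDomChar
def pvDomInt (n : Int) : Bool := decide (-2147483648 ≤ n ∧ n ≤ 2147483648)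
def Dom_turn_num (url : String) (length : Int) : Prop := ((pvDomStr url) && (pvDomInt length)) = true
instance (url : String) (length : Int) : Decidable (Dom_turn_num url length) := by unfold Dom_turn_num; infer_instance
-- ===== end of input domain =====

-- B replaces A's slash-position list, segment-substring list and nested weighted
-- comprehension by a single counter-driven pass over the characters (objective: simpler).

-- ===== PORT A =====
def pvOrd (c : Char) : Int := (c.toNat : Int)

-- char_index = [i for i in range(len(url)) if url[i] == '/']  (url[i] is always in range here)
def pvCharIndex (s : List Char) : List Nat :=
  (List.range s.length).filter (fun i => decide (s[i]? = some '/'))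

-- the char_weight loop: at index i append url[ci[i]:ci[i+1]]; the bare 'except' catches the
-- IndexError on ci[i+1] at the last i (no successor = the one-element branch), appending url[ci[i]:]
def pvSegs (s : List Char) : List Nat → List (List Char)
  | [] => []
  | [a] => [PySem.List.slice s (some (a : Int)) none]
  | a :: b :: rest =>
      PySem.List.slice s (some (a : Int)) (some (b : Int)) :: pvSegs s (b :: rest)

-- url_weight = [ord(j)*(num-i)*(num-i) for i in range(len(char_weight)) for j in char_weight[i]]
def pvAw (s : List Char) : List Int :=
  let charIndex := 0 :: pvCharIndex s                 -- char_index.insert(0, 0)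
  let charWeight := pvSegs s charIndex
  let num : Int := (charWeight.length : Int)
  (PySem.List.enumerate charWeight 0).flatMap
    (fun p => p.2.map (fun c => pvOrd c * (num - p.1) * (num - p.1)))

def turn_num (url : String) (length : Int) : List Int :=
  let urlWeight := pvAw (PySem.List.slice url.toList (some length) none)  -- url = url[length:]
  -- for i in range(len(url_weight), dim): url_weight.append(0)
  (PySem.List.pyRange (urlWeight.length : Int) 75 1).foldl
    (fun acc _ => acc ++ [(0 : Int)]) urlWeight

-- ===== PORT B =====
def turn_num_alt (url : String) (length : Int) : List Int :=
  let s := PySem.List.slice url.toList (some length) none                 -- tail = url[length:]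
  let num : Int := (PySem.List.count s '/' : Int) + 1
  let r := s.foldl (fun (st : List Int × Int) c =>
      let seg := if c = '/' then st.2 + 1 else st.2
      (st.1 ++ [pvOrd c * (num - seg) * (num - seg)], seg))
    (([], 0) : List Int × Int)
  r.1 ++ List.replicate (75 - r.1.length) (0 : Int)   -- out.extend([0]*(dim-len(out)))

-- ===== PRECONDITION & SPEC =====
def Spec_turn_num (url : String) (length : Int) (out : List Int) : Prop := out = turn_num_alt url length
instance (url : String) (length : Int) (out : List Int) : Decidable (Spec_turn_num url length out) := by unfold Spec_turn_num; infer_instance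

-- ===== CLAIM (what is proved, stated in full; the proofs are below) =====
def Claim_equal_turn_num : Prop := ∀ (url : String) (length : Int), Dom_turn_num url length → Spec_turn_num url length (turn_num url length)

-- ===== LEMMAS AND PROOFS =====

-- the per-character weight list both programs produce (proof object only)
def pvG (n : Int) : List Char → List Int
  | [] => []
  | c :: t =>
      if c = '/' then pvOrd c * (n - 1) * (n - 1) :: pvG (n - 1) t
      else pvOrd c * n * n :: pvG n t

-- segment-list weigher with the running weight made explicit
def pvW1 (n : Int) : List (List Char) → List Int
  | [] => []
  | g :: gs => g.map (fun c => pvOrd c * n * n) ++ pvW1 (n - 1) gs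

theorem pvG_noslash (n : Int) (s : List Char) (h : '/' ∉ s) :
    pvG n s = s.map (fun c => pvOrd c * n * n) := by
  induction s with
  | nil => rfl
  | cons c t ih =>
    simp only [List.mem_cons, not_or] at h
    simp [pvG, Ne.symm h.1, ih h.2]

theorem pvG_append_noslash (n : Int) (u t : List Char) (h : '/' ∉ u) :
    pvG n (u ++ t) = u.map (fun c => pvOrd c * n * n) ++ pvG n t := by
  induction u with
  | nil => rfl
  | cons c u' ih =>
    simp only [List.mem_cons, not_or] at h
    simp [pvG, Ne.symm h.1, ih h.2]

theorem pvCharIndex_cons (c : Char) (t : List Char) :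
    pvCharIndex (c :: t) =
      (if c = '/' then [0] else []) ++ (pvCharIndex t).map (· + 1) := by
  simp only [pvCharIndex, List.length_cons, List.range_succ_eq_map, List.filter_cons,
    List.filter_map]
  by_cases h : c = '/' <;> simp [h, Function.comp_def] <;> rfl

theorem pvCharIndex_noslash (s : List Char) (h : '/' ∉ s) : pvCharIndex s = [] := by
  induction s with
  | nil => rfl
  | cons c t ih =>
    simp only [List.mem_cons, not_or] at h
    simp [pvCharIndex_cons, Ne.symm h.1, ih h.2]

theorem pvCharIndex_append (u v : List Char) (h : '/' ∉ u) :
    pvCharIndex (u ++ '/' :: v) = u.length :: (pvCharIndex v).map (· + (u.length + 1)) := by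
  induction u with
  | nil => simp [pvCharIndex_cons]
  | cons c u' ih =>
    simp only [List.mem_cons, not_or] at h
    rw [List.cons_append, pvCharIndex_cons, ih h.2]
    simp [Ne.symm h.1, List.map_map, Function.comp_def]
    exact fun a _ => rfl

theorem pvCharIndex_length (s : List Char) : (pvCharIndex s).length = s.count '/' := by
  induction s with
  | nil => rfl
  | cons c t ih =>
    by_cases h : c = '/' <;> simp [pvCharIndex_cons, h, ih]

theorem pvSegs_length (s : List Char) (qs : List Nat) : (pvSegs s qs).length = qs.length := by
  induction qs with
  | nil => rfl
  | cons a qs ih =>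
    cases qs with
    | nil => rfl
    | cons b rest => simpa [pvSegs] using ih

theorem pvSegs_shift (u w : List Char) (qs : List Nat) :
    pvSegs (u ++ w) (qs.map (· + u.length)) = pvSegs w qs := by
  induction qs with
  | nil => rfl
  | cons a qs ih =>
    cases qs with
    | nil =>
      simp only [List.map_cons, List.map_nil, pvSegs]
      rw [PySem.List.slice_from_natCast, PySem.List.slice_from_natCast]
      simp [List.drop_append]
    | cons b rest =>
      simp only [List.map_cons, pvSegs] at ih ⊢
      rw [ih]
      rw [PySem.List.slice_natCast, PySem.List.slice_natCast]
      congr 1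
      rw [List.drop_append, List.drop_eq_nil_of_le (by omega : u.length ≤ a + u.length),
        List.nil_append]
      have e1 : a + u.length - u.length = a := by omega
      have e2 : b + u.length - (a + u.length) = b - a := by omega
      rw [e1, e2]

theorem pvSegs_slash (v : List Char) (qs : List Nat) :
    pvSegs ('/' :: v) (0 :: qs.map (· + 1)) =
      match pvSegs v (0 :: qs) with
      | [] => []
      | g :: gs => ('/' :: g) :: gs := by
  cases qs with
  | nil =>
    show [PySem.List.slice ('/' :: v) (some ((0 : Nat) : Int)) none] = _
    rw [PySem.List.slice_from_natCast]
    show _ = [('/' :: PySem.List.slice v (some ((0 : Nat) : Int)) none)]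
    rw [PySem.List.slice_from_natCast]
    simp
  | cons b rest =>
    simp only [List.map_cons, pvSegs]
    have h1 : (((b : Nat) + 1) :: rest.map (· + 1)) = (b :: rest).map (· + (['/'] : List Char).length) := by
      simp
    rw [h1]
    rw [show pvSegs ('/' :: v) (List.map (fun x => x + (['/'] : List Char).length) (b :: rest))
          = pvSegs v (b :: rest) from pvSegs_shift ['/'] v (b :: rest)]
    rw [PySem.List.slice_natCast, PySem.List.slice_natCast]
    simp

theorem pvEnum_flatMap (num : Int) (xs : List (List Char)) (s : Int) :
    (PySem.List.enumerate xs s).flatMap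
        (fun p => p.2.map (fun c => pvOrd c * (num - p.1) * (num - p.1)))
      = pvW1 (num - s) xs := by
  induction xs generalizing s with
  | nil => rfl
  | cons g gs ih =>
    rw [PySem.List.enumerate_cons]
    simp only [List.flatMap_cons, ih, pvW1]
    ring_nf

theorem pvDropWhileHead {α : Type} (p : α → Bool) (l : List α) (c : α) (v : List α)
    (h : l.dropWhile p = c :: v) : p c = false := by
  induction l with
  | nil => simp at h
  | cons a t ih =>
    rw [List.dropWhile_cons] at h
    by_cases hp : p a = true
    · exact ih (by simpa [hp] using h)
    · simp only [hp] at h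
      cases h
      · simpa using hp

theorem pvMainAux : ∀ (N : Nat) (s : List Char), s.length ≤ N →
    pvW1 ((s.count '/' : Int) + 1) (pvSegs s (0 :: pvCharIndex s))
      = pvG ((s.count '/' : Int) + 1) s := by
  intro N
  induction N with
  | zero =>
    intro s hs
    have : s = [] := List.eq_nil_of_length_eq_zero (by omega)
    subst this; rfl
  | succ N ih =>
    intro s hs
    set p : Char → Bool := fun c => decide (c ≠ '/') with hp
    have hsplit : s.takeWhile p ++ s.dropWhile p = s := List.takeWhile_append_dropWhile
    set u := s.takeWhile p with hu
    have hnu : '/' ∉ u := by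
      intro hmem
      have := List.mem_takeWhile_imp hmem
      simp [hp] at this
    cases hr : s.dropWhile p with
    | nil =>
      -- no slash in s
      have hse : s = u := by rw [← hsplit, hr, List.append_nil]
      have hns : '/' ∉ s := hse ▸ hnu
      have hc : s.count '/' = 0 := by
        rw [List.count_eq_zero]
        intro hm; exact hns (by simpa using hm)
      rw [pvCharIndex_noslash s hns, hc]
      show pvW1 ((0 : Int) + 1) [PySem.List.slice s (some ((0 : Nat) : Int)) none] = _
      rw [PySem.List.slice_from_natCast]
      simp only [List.drop_zero, pvW1, List.append_nil, zero_add]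
      rw [pvG_noslash _ _ hns]
      norm_num
    | cons c v =>
      have hcEq : c = '/' := by
        have := pvDropWhileHead p s c v hr
        simp [hp] at this; exact this
      subst hcEq
      have hse : s = u ++ '/' :: v := by rw [← hsplit, hr]
      have hlen : v.length ≤ N := by
        have : s.length = u.length + (v.length + 1) := by
          rw [hse]; simp
        omega
      have hcu : u.count '/' = 0 := by
        rw [List.count_eq_zero]; intro hm; exact hnu (by simpa using hm)
      have hcnt : s.count '/' = v.count '/' + 1 := by
        rw [hse]; simp [List.count_append, hcu]
      -- the char_index of s
      rw [hse, pvCharIndex_append u v hnu]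
      -- peel the first segment
      show pvW1 _ (PySem.List.slice (u ++ '/' :: v) (some ((0 : Nat) : Int)) (some ((u.length : Nat) : Int))
            :: pvSegs (u ++ '/' :: v) (u.length :: (pvCharIndex v).map (· + (u.length + 1)))) = _
      have hseg1 : PySem.List.slice (u ++ '/' :: v) (some ((0 : Nat) : Int)) (some ((u.length : Nat) : Int)) = u := by
        rw [PySem.List.slice_natCast]
        simp
      have hmap : u.length :: (pvCharIndex v).map (· + (u.length + 1))
          = (0 :: (pvCharIndex v).map (· + 1)).map (· + u.length) := by
        simp [List.map_map, Function.comp_def]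
        exact fun a _ => by omega
      rw [hseg1, hmap, pvSegs_shift u ('/' :: v) (0 :: (pvCharIndex v).map (· + 1)),
        pvSegs_slash v (pvCharIndex v)]
      -- the recursive segment list of v is a cons
      rcases hgs : pvSegs v (0 :: pvCharIndex v) with _ | ⟨g, gs⟩
      · exfalso
        have := pvSegs_length v (0 :: pvCharIndex v)
        rw [hgs] at this; simp at this
      -- assemble both sides
      have ihv := ih v hlen
      rw [hgs] at ihv
      have hn : ((u ++ '/' :: v).count '/' : Int) + 1 = ((v.count '/' : Int) + 1) + 1 := by
        rw [← hse, hcnt]; push_cast; ring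
      rw [hn]
      simp only [pvW1, List.map_cons]
      rw [pvG_append_noslash _ u ('/' :: v) hnu]
      simp only [pvG, if_pos]
      have e1 : (v.count '/' : Int) + 1 + 1 - 1 = (v.count '/' : Int) + 1 := by ring
      rw [e1, ← ihv]
      simp [pvW1]

theorem pvMain (s : List Char) :
    pvW1 ((s.count '/' : Int) + 1) (pvSegs s (0 :: pvCharIndex s))
      = pvG ((s.count '/' : Int) + 1) s :=
  pvMainAux s.length s le_rfl

theorem pvAw_eq (s : List Char) : pvAw s = pvG ((s.count '/' : Int) + 1) s := by
  unfold pvAw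
  rw [pvEnum_flatMap]
  have hlen : ((pvSegs s (0 :: pvCharIndex s)).length : Int) - 0 = (s.count '/' : Int) + 1 := by
    rw [pvSegs_length, List.length_cons, pvCharIndex_length]
    push_cast; ring
  rw [hlen, pvMain]

theorem pvBfold (num : Int) (s : List Char) (out : List Int) (seg : Int) :
    (s.foldl (fun (st : List Int × Int) c =>
        let sg := if c = '/' then st.2 + 1 else st.2
        (st.1 ++ [pvOrd c * (num - sg) * (num - sg)], sg)) (out, seg)).1
      = out ++ pvG (num - seg) s := by
  induction s generalizing out seg with
  | nil => simp [pvG]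
  | cons c t ih =>
    by_cases h : c = '/'
    · simp only [List.foldl_cons, h, ih, pvG]
      have e : num - (seg + 1) = num - seg - 1 := by ring
      simp [e]
    · simp only [List.foldl_cons, if_neg h, ih]
      simp [pvG, h]

theorem pvPad (r : List Int) (l : List Int) :
    r.foldl (fun acc _ => acc ++ [(0 : Int)]) l = l ++ List.replicate r.length 0 := by
  induction r generalizing l with
  | nil => simp
  | cons x r ih =>
    rw [List.foldl_cons, ih, List.append_assoc]
    rfl

-- ===== VERDICT (by name: the statement is the Claim_ definition above) =====
theorem turn_num_spec : Claim_equal_turn_num := by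
  intro url length _
  unfold Spec_turn_num turn_num turn_num_alt
  set s := PySem.List.slice url.toList (some length) none with hsdef
  set n : Int := (List.count '/' s : Int) + 1 with hn
  have hA : pvAw s = pvG n s := by rw [pvAw_eq, hn]
  have hB : (s.foldl (fun (st : List Int × Int) c =>
      let seg := if c = '/' then st.2 + 1 else st.2
      (st.1 ++ [pvOrd c * (((PySem.List.count s '/' : Int) + 1) - seg)
          * (((PySem.List.count s '/' : Int) + 1) - seg)], seg))
      (([], 0) : List Int × Int)).1 = pvG n s := by
    rw [pvBfold ((PySem.List.count s '/' : Int) + 1) s [] 0]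
    rw [PySem.List.count_eq]
    simp [hn]
  simp only []
  rw [hA, hB, pvPad, PySem.List.length_pyRange_one]
  congr 1
  congr 1
  omega
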